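-- pv_equiv track=rewrite | github.com/Jonathan3712/Role-Mangement | main.py | get_access_privileges_for_role
-- ===== SOURCE A (Python) =====
-- def get_access_privileges_for_role(role: str):
--     """
--     Return a dictionary of table -> access based on user's role.
--     This makes the logic reusable for both HTML and JSON responses.
--     """
--     # Default: no access
--     privileges = {
--         'SE_Data': 'No Access',
--         'HR_Data': 'No Access',
--         'PR_Data': 'No Access',
--         'Emp_SE': 'No Access',
--         'Emp_HR': 'No Access',
--         'Emp_PR': 'No Access',
--         'LogIn_Credential': 'No Access',
--     }
--
--     if role == 'Admin':
--         for key in privileges.keys():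
--             privileges[key] = 'Read/Write'
--     elif role == 'SE':
--         privileges['SE_Data'] = 'Read/Write'
--         privileges['Emp_SE'] = 'Read/Write'
--     elif role == 'HR':
--         privileges['HR_Data'] = 'Read/Write'
--         privileges['Emp_HR'] = 'Read/Write'
--         privileges['Emp_PR'] = 'Read/Write'
--         privileges['Emp_SE'] = 'Read'
--     elif role == 'PR':
--         privileges['PR_Data'] = 'Read/Write'
--         privileges['Emp_PR'] = 'Read/Write'
--         privileges['Emp_SE'] = 'Read'
--         privileges['Emp_HR'] = 'Read'
--     elif role == 'General':
--         privileges['Emp_SE'] = 'Read'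
--         privileges['Emp_HR'] = 'Read'
--         privileges['Emp_PR'] = 'Read'
--
--     return privileges
-- ===== SOURCE B (Python) =====
-- TABLES = ['SE_Data', 'HR_Data', 'PR_Data', 'Emp_SE', 'Emp_HR', 'Emp_PR', 'LogIn_Credential']
--
-- def _access(role, table):
--     """Policy rule for one cell: derive the owning department from the
--     table's name (Dept_Data / Emp_Dept) and decide this role's access."""
--     if role == 'Admin':
--         return 'Read/Write'
--     if table == 'LogIn_Credential':
--         return 'No Access'
--     dept = table[4:] if table.startswith('Emp_') else table[:-5]
--     if role == dept:
--         return 'Read/Write'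
--     if table.startswith('Emp_'):
--         if role == 'HR' and dept == 'PR':
--             return 'Read/Write'
--         if role in ('HR', 'PR', 'General'):
--             return 'Read'
--     return 'No Access'
--
-- def get_access_privileges_for_role(role: str):
--     return {t: _access(role, t) for t in TABLES}
-- ===== Notes on version B (the rewrite author's own statement) =====
-- stated objective: alternative
-- what changed: Instead of dispatching on the role and mutating a default dict per branch, B computes each cell independently from a per-cell policy rule that derives the owning department from the table name (Dept_Data / Emp_Dept) and grants Read/Write for Admin or the owner, Read(/Write for HR on Emp_PR) on employee tables for HR/PR/General, else No Access.
import Mathlib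
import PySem

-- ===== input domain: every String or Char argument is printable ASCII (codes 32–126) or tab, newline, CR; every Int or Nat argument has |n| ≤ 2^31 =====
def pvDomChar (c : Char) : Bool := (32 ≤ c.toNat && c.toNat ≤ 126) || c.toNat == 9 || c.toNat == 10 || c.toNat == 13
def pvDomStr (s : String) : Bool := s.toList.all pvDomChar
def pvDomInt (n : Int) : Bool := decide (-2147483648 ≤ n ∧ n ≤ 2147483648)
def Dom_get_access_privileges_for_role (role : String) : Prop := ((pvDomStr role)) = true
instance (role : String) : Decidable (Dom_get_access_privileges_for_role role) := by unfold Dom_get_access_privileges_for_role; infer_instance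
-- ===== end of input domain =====

-- B replaces A's role-dispatch that mutates a default dict by an independent per-cell policy rule derived from each table's name (alternative; same cost).
-- ===== PORT A =====
def get_access_privileges_for_role (role : String) : List (String × String) :=
  let privileges : PySem.Dict String String :=
    PySem.Dict.ofList
    [("SE_Data", "No Access"), ("HR_Data", "No Access"), ("PR_Data", "No Access"),
     ("Emp_SE", "No Access"), ("Emp_HR", "No Access"), ("Emp_PR", "No Access"),
     ("LogIn_Credential", "No Access")]
  PySem.Dict.items <|
  if role = "Admin" then
    (PySem.Dict.keys privileges).foldl (fun d k => PySem.Dict.insert d k "Read/Write") privileges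
  else if role = "SE" then
    PySem.Dict.insert (PySem.Dict.insert privileges "SE_Data" "Read/Write") "Emp_SE" "Read/Write"
  else if role = "HR" then
    PySem.Dict.insert (PySem.Dict.insert (PySem.Dict.insert (PySem.Dict.insert privileges
      "HR_Data" "Read/Write") "Emp_HR" "Read/Write") "Emp_PR" "Read/Write") "Emp_SE" "Read"
  else if role = "PR" then
    PySem.Dict.insert (PySem.Dict.insert (PySem.Dict.insert (PySem.Dict.insert privileges
      "PR_Data" "Read/Write") "Emp_PR" "Read/Write") "Emp_SE" "Read") "Emp_HR" "Read"
  else if role = "General" then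
    PySem.Dict.insert (PySem.Dict.insert (PySem.Dict.insert privileges
      "Emp_SE" "Read") "Emp_HR" "Read") "Emp_PR" "Read"
  else
    privileges

-- ===== PORT B =====
def pvTables : List String :=
  ["SE_Data", "HR_Data", "PR_Data", "Emp_SE", "Emp_HR", "Emp_PR", "LogIn_Credential"]

-- policy rule for one cell (B's helper _access)
def pvAccess (role t : String) : String :=
  if role = "Admin" then "Read/Write"
  else if t = "LogIn_Credential" then "No Access"
  else
    let dept := if PySem.Str.startswith t "Emp_" then PySem.Str.slice t (some 4) none
                else PySem.Str.slice t none (some (-5))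
    if role = dept then "Read/Write"
    else if PySem.Str.startswith t "Emp_" then
      if role = "HR" ∧ dept = "PR" then "Read/Write"
      else if role = "HR" ∨ role = "PR" ∨ role = "General" then "Read"
      else "No Access"
    else "No Access"

def get_access_privileges_for_role_alt (role : String) : List (String × String) :=
  (PySem.Dict.ofList (pvTables.map (fun t => (t, pvAccess role t)))).items

-- ===== PRECONDITION & SPEC =====
def Spec_get_access_privileges_for_role (role : String) (out : List (String × String)) : Prop := out = get_access_privileges_for_role_alt role
instance (role : String) (out : List (String × String)) : Decidable (Spec_get_access_privileges_for_role role out) := by unfold Spec_get_access_privileges_for_role; infer_instance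

-- ===== CLAIM =====
def Claim_equal_get_access_privileges_for_role : Prop := ∀ (role : String), Dom_get_access_privileges_for_role role → Spec_get_access_privileges_for_role role (get_access_privileges_for_role role)

-- ===== LEMMAS AND PROOFS =====
theorem pvAccess_unknown (role t : String)
    (h1 : role ≠ "Admin") (h2 : role ≠ "SE") (h3 : role ≠ "HR")
    (h4 : role ≠ "PR") (h5 : role ≠ "General") (ht : t ∈ pvTables) :
    pvAccess role t = "No Access" := by
  have w1 : PySem.Chars.startswith "SE_Data".toList "Emp_".toList = false := by decide
  have w2 : PySem.Chars.startswith "HR_Data".toList "Emp_".toList = false := by decide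
  have w3 : PySem.Chars.startswith "PR_Data".toList "Emp_".toList = false := by decide
  have w4 : PySem.Chars.startswith "Emp_SE".toList "Emp_".toList = true := by decide
  have w5 : PySem.Chars.startswith "Emp_HR".toList "Emp_".toList = true := by decide
  have w6 : PySem.Chars.startswith "Emp_PR".toList "Emp_".toList = true := by decide
  have d1 : PySem.Str.slice "SE_Data" none (some (-5)) = "SE" := by decide
  have d2 : PySem.Str.slice "HR_Data" none (some (-5)) = "HR" := by decide
  have d3 : PySem.Str.slice "PR_Data" none (some (-5)) = "PR" := by decide
  have d4 : PySem.Str.slice "Emp_SE" (some 4) none = "SE" := by decide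
  have d5 : PySem.Str.slice "Emp_HR" (some 4) none = "HR" := by decide
  have d6 : PySem.Str.slice "Emp_PR" (some 4) none = "PR" := by decide
  fin_cases ht <;>
    norm_num [pvAccess, w1, w2, w3, w4, w5, w6, d1, d2, d3, d4, d5, d6,
      h1, h2, h3, h4, h5]

-- ===== VERDICT =====
theorem get_access_privileges_for_role_spec : Claim_equal_get_access_privileges_for_role := by
  intro role _
  unfold Spec_get_access_privileges_for_role
  by_cases h1 : role = "Admin"
  · subst h1; decide
  by_cases h2 : role = "SE"
  · subst h2; decide
  by_cases h3 : role = "HR"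
  · subst h3; decide
  by_cases h4 : role = "PR"
  · subst h4; decide
  by_cases h5 : role = "General"
  · subst h5; decide
  have hacc : ∀ t ∈ pvTables, pvAccess role t = "No Access" := fun t ht =>
    pvAccess_unknown role t h1 h2 h3 h4 h5 ht
  simp only [get_access_privileges_for_role, get_access_privileges_for_role_alt,
    if_neg h1, if_neg h2, if_neg h3, if_neg h4, if_neg h5, pvTables] at *
  simp only [List.map, hacc "SE_Data" (by decide), hacc "HR_Data" (by decide),
    hacc "PR_Data" (by decide), hacc "Emp_SE" (by decide), hacc "Emp_HR" (by decide),
    hacc "Emp_PR" (by decide), hacc "LogIn_Credential" (by decide)]
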